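-- pv_equiv track=rewrite | github.com/Pressio/od-rom | code/main_create_rectangular_partitions.py | _mapCellGidsToStateDofsGids
-- ===== SOURCE A (Python) =====
-- def _mapCellGidsToStateDofsGids(cellGidsDic, numDofsPerCell):
--   d = {}
--
--   if numDofsPerCell == 1:
--     for pCount, pCellGids in cellGidsDic.items():
--       myl = [int(i) for i in pCellGids]
--       d[pCount] = myl
--
--   elif numDofsPerCell == 2:
--     for pCount, pCellGids in cellGidsDic.items():
--       myl = [None]*len(pCellGids)*2
--       myl[0::2] = [int(i*2)   for i in pCellGids]
--       myl[1::2] = [int(i*2+1) for i in pCellGids]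
--       d[pCount] = myl
--
--   elif numDofsPerCell == 3:
--     for pCount, pCellGids in cellGidsDic.items():
--       myl = [None]*len(pCellGids)*3
--       myl[0::3] = [int(i*3)   for i in pCellGids]
--       myl[1::3] = [int(i*3+1) for i in pCellGids]
--       myl[2::3] = [int(i*3+2) for i in pCellGids]
--       d[pCount] = myl
--
--   elif numDofsPerCell == 4:
--     for pCount, pCellGids in cellGidsDic.items():
--       myl = [None]*len(pCellGids)*4
--       myl[0::4] = [int(i*4)   for i in pCellGids]
--       myl[1::4] = [int(i*4+1) for i in pCellGids]
--       myl[2::4] = [int(i*4+2) for i in pCellGids]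
--       myl[3::4] = [int(i*4+3) for i in pCellGids]
--       d[pCount] = myl
--
--   elif numDofsPerCell == 5:
--     for pCount, pCellGids in cellGidsDic.items():
--       myl = [None]*len(pCellGids)*5
--       myl[0::5] = [int(i*5)   for i in pCellGids]
--       myl[1::5] = [int(i*5+1) for i in pCellGids]
--       myl[2::5] = [int(i*5+2) for i in pCellGids]
--       myl[3::5] = [int(i*5+3) for i in pCellGids]
--       myl[4::5] = [int(i*5+4) for i in pCellGids]
--       d[pCount] = myl
--
--   return d
-- ===== SOURCE B (Python) =====
-- def _mapCellGidsToStateDofsGids(cellGidsDic, numDofsPerCell):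
--   if numDofsPerCell not in (1, 2, 3, 4, 5):
--     return {}
--   return {pCount: [int(i*numDofsPerCell + k)
--                    for i in pCellGids
--                    for k in range(numDofsPerCell)]
--           for pCount, pCellGids in cellGidsDic.items()}
-- ===== Notes on version B (the rewrite author's own statement) =====
-- stated objective: simpler
-- what changed: Replaces the five copy-pasted branches with preallocated None-arrays filled by strided slice assignments by one dict comprehension that emits each cell's DOF gids in order via a nested comprehension, keeping a single membership guard so unsupported numDofsPerCell values still yield {}.
import Mathlib
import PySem

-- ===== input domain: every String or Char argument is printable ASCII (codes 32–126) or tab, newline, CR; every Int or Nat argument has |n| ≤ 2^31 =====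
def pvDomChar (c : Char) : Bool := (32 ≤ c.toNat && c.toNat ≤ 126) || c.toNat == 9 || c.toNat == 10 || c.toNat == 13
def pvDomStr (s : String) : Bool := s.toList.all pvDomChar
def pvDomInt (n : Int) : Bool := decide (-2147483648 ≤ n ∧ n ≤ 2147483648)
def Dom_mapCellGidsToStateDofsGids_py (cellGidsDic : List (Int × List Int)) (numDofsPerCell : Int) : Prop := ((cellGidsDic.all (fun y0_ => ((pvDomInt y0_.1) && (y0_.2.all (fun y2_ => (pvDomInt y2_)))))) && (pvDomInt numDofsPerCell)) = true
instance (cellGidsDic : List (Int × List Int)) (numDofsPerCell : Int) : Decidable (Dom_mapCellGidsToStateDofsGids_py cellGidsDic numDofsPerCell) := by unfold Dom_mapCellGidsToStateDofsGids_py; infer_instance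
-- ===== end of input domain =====

-- B replaces A's five copy-pasted strided-slice-fill branches by one in-order nested comprehension
-- behind a single membership guard (objective: simpler; equivalence of return values is what is proved).

-- ===== PORT A =====
-- interleave helpers: myl[0::2]=xs; myl[1::2]=ys (etc.) over a fresh [None]*len*k array produces
-- exactly the round-robin interleaving of the assigned lists (all of equal length here)
def pvIlv2 : List Int → List Int → List Int
  | a :: as, b :: bs => a :: b :: pvIlv2 as bs
  | _, _ => []

def pvIlv3 : List Int → List Int → List Int → List Int
  | a :: as, b :: bs, c :: cs => a :: b :: c :: pvIlv3 as bs cs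
  | _, _, _ => []

def pvIlv4 : List Int → List Int → List Int → List Int → List Int
  | a :: as, b :: bs, c :: cs, d :: ds => a :: b :: c :: d :: pvIlv4 as bs cs ds
  | _, _, _, _ => []

def pvIlv5 : List Int → List Int → List Int → List Int → List Int → List Int
  | a :: as, b :: bs, c :: cs, d :: ds, e :: es => a :: b :: c :: d :: e :: pvIlv5 as bs cs ds es
  | _, _, _, _, _ => []

def mapCellGidsToStateDofsGids_py (cellGidsDic : List (Int × List Int)) (numDofsPerCell : Int) : List (Int × List Int) :=
  if numDofsPerCell = 1 then
    cellGidsDic.foldl (fun d pg => d ++ [(pg.1, pg.2.map (fun i => i))]) []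
  else if numDofsPerCell = 2 then
    cellGidsDic.foldl (fun d pg =>
      d ++ [(pg.1, pvIlv2 (pg.2.map (fun i => i*2)) (pg.2.map (fun i => i*2+1)))]) []
  else if numDofsPerCell = 3 then
    cellGidsDic.foldl (fun d pg =>
      d ++ [(pg.1, pvIlv3 (pg.2.map (fun i => i*3)) (pg.2.map (fun i => i*3+1))
                          (pg.2.map (fun i => i*3+2)))]) []
  else if numDofsPerCell = 4 then
    cellGidsDic.foldl (fun d pg =>
      d ++ [(pg.1, pvIlv4 (pg.2.map (fun i => i*4)) (pg.2.map (fun i => i*4+1))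
                          (pg.2.map (fun i => i*4+2)) (pg.2.map (fun i => i*4+3)))]) []
  else if numDofsPerCell = 5 then
    cellGidsDic.foldl (fun d pg =>
      d ++ [(pg.1, pvIlv5 (pg.2.map (fun i => i*5)) (pg.2.map (fun i => i*5+1))
                          (pg.2.map (fun i => i*5+2)) (pg.2.map (fun i => i*5+3))
                          (pg.2.map (fun i => i*5+4)))]) []
  else []

-- ===== PORT B =====
def mapCellGidsToStateDofsGids_py_alt (cellGidsDic : List (Int × List Int)) (numDofsPerCell : Int) : List (Int × List Int) :=
  if numDofsPerCell = 1 ∨ numDofsPerCell = 2 ∨ numDofsPerCell = 3 ∨ numDofsPerCell = 4 ∨ numDofsPerCell = 5 then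
    cellGidsDic.map (fun pg =>
      (pg.1, pg.2.flatMap (fun i =>
        (PySem.List.pyRange 0 numDofsPerCell 1).map (fun k => i*numDofsPerCell + k))))
  else []

-- ===== PRECONDITION & SPEC =====
def Spec_mapCellGidsToStateDofsGids_py (cellGidsDic : List (Int × List Int)) (numDofsPerCell : Int) (out : List (Int × List Int)) : Prop := out = mapCellGidsToStateDofsGids_py_alt cellGidsDic numDofsPerCell
instance (cellGidsDic : List (Int × List Int)) (numDofsPerCell : Int) (out : List (Int × List Int)) : Decidable (Spec_mapCellGidsToStateDofsGids_py cellGidsDic numDofsPerCell out) := by unfold Spec_mapCellGidsToStateDofsGids_py; infer_instance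

-- ===== CLAIM (what is proved, stated in full; the proofs are below) =====
def Claim_equal_mapCellGidsToStateDofsGids_py : Prop := ∀ (cellGidsDic : List (Int × List Int)) (numDofsPerCell : Int), Dom_mapCellGidsToStateDofsGids_py cellGidsDic numDofsPerCell → Spec_mapCellGidsToStateDofsGids_py cellGidsDic numDofsPerCell (mapCellGidsToStateDofsGids_py cellGidsDic numDofsPerCell)

-- ===== LEMMAS AND PROOFS =====

theorem pvIlv2_map (f g : Int → Int) (l : List Int) :
    pvIlv2 (l.map f) (l.map g) = l.flatMap (fun i => [f i, g i]) := by
  induction l with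
  | nil => rfl
  | cons a l ih => simp [pvIlv2, ih]

theorem pvIlv3_map (f g h : Int → Int) (l : List Int) :
    pvIlv3 (l.map f) (l.map g) (l.map h) = l.flatMap (fun i => [f i, g i, h i]) := by
  induction l with
  | nil => rfl
  | cons a l ih => simp [pvIlv3, ih]

theorem pvIlv4_map (f g h k : Int → Int) (l : List Int) :
    pvIlv4 (l.map f) (l.map g) (l.map h) (l.map k) = l.flatMap (fun i => [f i, g i, h i, k i]) := by
  induction l with
  | nil => rfl
  | cons a l ih => simp [pvIlv4, ih]

theorem pvIlv5_map (f g h k m : Int → Int) (l : List Int) :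
    pvIlv5 (l.map f) (l.map g) (l.map h) (l.map k) (l.map m) = l.flatMap (fun i => [f i, g i, h i, k i, m i]) := by
  induction l with
  | nil => rfl
  | cons a l ih => simp [pvIlv5, ih]

-- ===== VERDICT (by name: the statement is the Claim_ definition above) =====
theorem mapCellGidsToStateDofsGids_py_spec : Claim_equal_mapCellGidsToStateDofsGids_py := by
  intro cellGidsDic n _
  unfold Spec_mapCellGidsToStateDofsGids_py
  unfold mapCellGidsToStateDofsGids_py mapCellGidsToStateDofsGids_py_alt
  by_cases h1 : n = 1
  · subst h1
    rw [PySem.List.foldl_append_singleton_eq_map, List.nil_append, if_pos (by omega)]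
    refine List.map_congr_left fun pg _ => ?_
    have hr : PySem.List.pyRange 0 1 1 = [0] := by decide
    simp [hr]
  · by_cases h2 : n = 2
    · subst h2
      rw [if_neg h1, PySem.List.foldl_append_singleton_eq_map, List.nil_append, if_pos (by omega)]
      refine List.map_congr_left fun pg _ => ?_
      have hr : PySem.List.pyRange 0 2 1 = [0, 1] := by decide
      simp [hr, pvIlv2_map]
    · by_cases h3 : n = 3
      · subst h3
        rw [if_neg h1, if_neg h2, PySem.List.foldl_append_singleton_eq_map, List.nil_append,
          if_pos (by omega)]
        refine List.map_congr_left fun pg _ => ?_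
        have hr : PySem.List.pyRange 0 3 1 = [0, 1, 2] := by decide
        simp [hr, pvIlv3_map]
      · by_cases h4 : n = 4
        · subst h4
          rw [if_neg h1, if_neg h2, if_neg h3, PySem.List.foldl_append_singleton_eq_map,
            List.nil_append, if_pos (by omega)]
          refine List.map_congr_left fun pg _ => ?_
          have hr : PySem.List.pyRange 0 4 1 = [0, 1, 2, 3] := by decide
          simp [hr, pvIlv4_map]
        · by_cases h5 : n = 5
          · subst h5
            rw [if_neg h1, if_neg h2, if_neg h3, if_neg h4,
              PySem.List.foldl_append_singleton_eq_map, List.nil_append, if_pos (by omega)]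
            refine List.map_congr_left fun pg _ => ?_
            have hr : PySem.List.pyRange 0 5 1 = [0, 1, 2, 3, 4] := by decide
            simp [hr, pvIlv5_map]
          · simp [h1, h2, h3, h4, h5]
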